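-- pv_equiv track=rewrite | github.com/hamad-tariq/ipRiskAnalysis | amzn-extension-backend/app.py | detect_castle_top_pattern
-- ===== SOURCE A (Python) =====
-- def detect_castle_top_pattern(series, window=4320):
--     if len(series) < window:
--         return [0] * len(series)
--
--     pattern_detected = [0] * window
--     for i in range(window, len(series) - window):
--         is_castle_top = all(series[j] > series[j - 1] and series[j] > series[j + 1] for j in range(i - window // 2, i + window // 2, 2))
--         pattern_detected.append(int(is_castle_top))
--     pattern_detected.extend([0] * (len(series) - len(pattern_detected)))
--     return pattern_detected
-- ===== SOURCE B (Python) =====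
-- def detect_castle_top_pattern(series, window=4320):
--     n = len(series)
--     if n < window:
--         return [0] * n
--     w2 = window // 2
--     # peak[j]: strict local peak of series at j (False on the borders)
--     peak = [False] * n
--     for j in range(1, n - 1):
--         peak[j] = series[j - 1] < series[j] > series[j + 1]
--     # prefix counts of NON-peaks, separated by index parity:
--     # bad_even[k] / bad_odd[k] = #{ m < k : m even/odd and not peak[m] }
--     bad_even = [0] * (n + 1)
--     bad_odd = [0] * (n + 1)
--     for k in range(n):
--         miss = 0 if peak[k] else 1
--         bad_even[k + 1] = bad_even[k] + (miss if k % 2 == 0 else 0)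
--         bad_odd[k + 1] = bad_odd[k] + (miss if k % 2 == 1 else 0)
--     out = [0] * window
--     for i in range(window, n - window):
--         lo, hi = i - w2, i + w2
--         if lo >= hi:
--             out.append(1)
--         else:
--             pref = bad_even if lo % 2 == 0 else bad_odd
--             out.append(1 if pref[hi] == pref[lo] else 0)
--     out.extend([0] * (n - len(out)))
--     return out
-- ===== Notes on version B (the rewrite author's own statement) =====
-- stated objective: alternative
-- what changed: Replaces the per-index strided all() window scan with a one-pass precomputation of local-peak booleans plus parity-separated prefix counts of non-peaks, answering each index with one prefix-difference query; worst-case cost drops from O(n*window) to O(n), but A's short-circuiting all() is as fast on typical data, so no speed is claimed.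
import Mathlib
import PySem

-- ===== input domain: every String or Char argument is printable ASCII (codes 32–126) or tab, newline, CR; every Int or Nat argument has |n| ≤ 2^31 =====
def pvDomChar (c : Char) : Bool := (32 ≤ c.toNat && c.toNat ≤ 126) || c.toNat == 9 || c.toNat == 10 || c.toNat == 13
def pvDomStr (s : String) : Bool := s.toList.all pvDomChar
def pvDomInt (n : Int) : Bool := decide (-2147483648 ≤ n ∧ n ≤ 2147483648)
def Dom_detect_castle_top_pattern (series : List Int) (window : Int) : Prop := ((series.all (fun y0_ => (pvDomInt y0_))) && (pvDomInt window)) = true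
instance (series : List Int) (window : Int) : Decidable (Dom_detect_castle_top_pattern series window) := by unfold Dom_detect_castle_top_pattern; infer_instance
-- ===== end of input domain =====

-- B replaces A's per-index strided all() window scan by precomputed local-peak booleans and
-- parity-separated prefix counts of non-peaks, one prefix-difference query per index (objective: alternative).

-- ===== PORT A =====
-- series[j] (Python indexing); on every index A actually evaluates the index is in range,
-- so the `.getD 0` default is never the value Python would not compute
def pvAt (series : List Int) (j : Int) : Int := (PySem.List.pyGet? series j).getD 0

def detect_castle_top_pattern (series : List Int) (window : Int) : List Int :=
  if (series.length : Int) < window then List.replicate series.length 0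
  else
    -- pattern_detected = [0]*window, then one append per i in range(window, len-window)
    let pd : List Int := List.replicate window.toNat 0 ++
      (PySem.List.pyRange window ((series.length : Int) - window) 1).map (fun i =>
        if (PySem.List.pyRange (i - PySem.Int.floordiv window 2) (i + PySem.Int.floordiv window 2) 2).all
             (fun j => decide (pvAt series j > pvAt series (j - 1) ∧ pvAt series j > pvAt series (j + 1)))
        then (1 : Int) else 0)
    -- pattern_detected.extend([0] * (len(series) - len(pattern_detected)))
    pd ++ List.replicate (series.length - pd.length) 0

-- ===== PORT B =====
-- peak[j] of Source B: strict local peak (False on the borders), Nat index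
def pvPeak (series : List Int) (j : Nat) : Bool :=
  if 1 ≤ j ∧ j + 1 < series.length then
    decide (series.getD (j - 1) 0 < series.getD j 0 ∧ series.getD (j + 1) 0 < series.getD j 0)
  else false

-- the bad_even/bad_odd prefix-count loop of Source B: pvBad series p k = #{ m < k : m % 2 = p ∧ ¬ peak[m] }
def pvBad (series : List Int) (p : Nat) : Nat → Nat
  | 0 => 0
  | k + 1 => pvBad series p k + (if pvPeak series k = false ∧ k % 2 = p then 1 else 0)

def detect_castle_top_pattern_alt (series : List Int) (window : Int) : List Int :=
  if (series.length : Int) < window then List.replicate series.length 0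
  else
    let w2 := PySem.Int.floordiv window 2
    let badE : List Nat := (List.range (series.length + 1)).map (pvBad series 0)
    let badO : List Nat := (List.range (series.length + 1)).map (pvBad series 1)
    let out : List Int := List.replicate window.toNat 0 ++
      (PySem.List.pyRange window ((series.length : Int) - window) 1).map (fun i =>
        if i + w2 ≤ i - w2 then (1 : Int)
        else
          if (if PySem.Int.mod (i - w2) 2 = 0 then badE else badO).getD (i + w2).toNat 0
             = (if PySem.Int.mod (i - w2) 2 = 0 then badE else badO).getD (i - w2).toNat 0
          then 1 else 0)
    out ++ List.replicate (series.length - out.length) 0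

-- ===== PRECONDITION & SPEC =====
def Spec_detect_castle_top_pattern (series : List Int) (window : Int) (out : List Int) : Prop := out = detect_castle_top_pattern_alt series window
instance (series : List Int) (window : Int) (out : List Int) : Decidable (Spec_detect_castle_top_pattern series window out) := by unfold Spec_detect_castle_top_pattern; infer_instance

-- ===== CLAIM (what is proved, stated in full; the proofs are below) =====
def Claim_equal_detect_castle_top_pattern : Prop := ∀ (series : List Int) (window : Int), Dom_detect_castle_top_pattern series window → Spec_detect_castle_top_pattern series window (detect_castle_top_pattern series window)

-- ===== LEMMAS AND PROOFS =====

lemma pvBad_mono (series : List Int) (p : Nat) {a b : Nat} (h : a ≤ b) :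
    pvBad series p a ≤ pvBad series p b := by
  induction b with
  | zero => have : a = 0 := by omega
            simp [this]
  | succ b ih =>
    rcases Nat.lt_or_ge a (b + 1) with hlt | hge
    · have := ih (by omega)
      have hstep : pvBad series p (b + 1)
          = pvBad series p b + (if pvPeak series b = false ∧ b % 2 = p then 1 else 0) := rfl
      omega
    · have : a = b + 1 := by omega
      simp [this]

-- prefix counts agree on [a, b) iff every index of parity p in [a, b) is a peak
lemma pvBad_eq_iff (series : List Int) (p : Nat) {a b : Nat} (h : a ≤ b) :
    pvBad series p b = pvBad series p a ↔
      ∀ k, a ≤ k → k < b → k % 2 = p → pvPeak series k = true := by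
  induction b with
  | zero =>
    have : a = 0 := by omega
    subst this
    constructor
    · intro _ k hk1 hk2 _; exact absurd hk2 (by omega)
    · intro _; rfl
  | succ b ih =>
    rcases Nat.lt_or_ge a (b + 1) with hlt | hge
    · have hab : a ≤ b := by omega
      have hmono := pvBad_mono series p hab
      have hstep : pvBad series p (b + 1)
          = pvBad series p b + (if pvPeak series b = false ∧ b % 2 = p then 1 else 0) := rfl
      by_cases hc : pvPeak series b = false ∧ b % 2 = p
      · rw [hstep, if_pos hc]
        constructor
        · intro heq; exact absurd heq (by omega)
        · intro hall
          exfalso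
          have := hall b hab (by omega) hc.2
          rw [this] at hc
          exact absurd hc.1 (by simp)
      · rw [hstep, if_neg hc, Nat.add_zero, ih hab]
        constructor
        · intro hall k hk1 hk2 hk3
          rcases Nat.lt_or_ge k b with h' | h'
          · exact hall k hk1 h' hk3
          · have hkb : k = b := by omega
            subst hkb
            rcases Bool.eq_false_or_eq_true (pvPeak series k) with ht | hf
            · exact ht
            · exact absurd ⟨hf, hk3⟩ hc
        · intro hall k hk1 hk2 hk3
          exact hall k hk1 (by omega) hk3
    · have : a = b + 1 := by omega
      subst this
      constructor
      · intro _ k hk1 hk2 _; exact absurd hk2 (by omega)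
      · intro _; rfl

-- A's indexed comparison equals B's peak predicate on in-range indices
lemma pvAt_peak (series : List Int) (j : Int) (h1 : 1 ≤ j) (h2 : j + 1 < (series.length : Int)) :
    decide (pvAt series j > pvAt series (j - 1) ∧ pvAt series j > pvAt series (j + 1))
      = pvPeak series j.toNat := by
  have hj0 : 0 ≤ j := by omega
  have hjn : j.toNat + 1 < series.length := by omega
  have hAt : ∀ m : Int, 0 ≤ m → m < (series.length : Int) → pvAt series m = series.getD m.toNat 0 := by
    intro m hm1 hm2
    simp [pvAt, PySem.List.pyGet?_of_nonneg series hm1, List.getD_eq_getElem?_getD]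
  rw [pvPeak, if_pos ⟨by omega, hjn⟩]
  rw [hAt j hj0 (by omega), hAt (j - 1) (by omega) (by omega), hAt (j + 1) (by omega) (by omega)]
  have e1 : (j - 1).toNat = j.toNat - 1 := by omega
  have e2 : (j + 1).toNat = j.toNat + 1 := by omega
  rw [e1, e2]

-- the per-index bodies agree
lemma body_eq (series : List Int) (window i : Int)
    (_hnw : window ≤ (series.length : Int))
    (hi1 : window ≤ i) (hi2 : i < (series.length : Int) - window) :
    (if (PySem.List.pyRange (i - PySem.Int.floordiv window 2) (i + PySem.Int.floordiv window 2) 2).all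
          (fun j => decide (pvAt series j > pvAt series (j - 1) ∧ pvAt series j > pvAt series (j + 1)))
      then (1 : Int) else 0)
    =
    (if i + PySem.Int.floordiv window 2 ≤ i - PySem.Int.floordiv window 2 then (1 : Int)
     else
       if (if PySem.Int.mod (i - PySem.Int.floordiv window 2) 2 = 0
             then (List.range (series.length + 1)).map (pvBad series 0)
             else (List.range (series.length + 1)).map (pvBad series 1)).getD
            (i + PySem.Int.floordiv window 2).toNat 0
          = (if PySem.Int.mod (i - PySem.Int.floordiv window 2) 2 = 0
             then (List.range (series.length + 1)).map (pvBad series 0)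
             else (List.range (series.length + 1)).map (pvBad series 1)).getD
            (i - PySem.Int.floordiv window 2).toNat 0
       then 1 else 0) := by
  set w2 := PySem.Int.floordiv window 2 with hw2
  have hdm := PySem.Int.floordiv_mul_add_mod window 2
  have hm0 : 0 ≤ PySem.Int.mod window 2 := PySem.Int.mod_nonneg window (by norm_num)
  have hm2 : PySem.Int.mod window 2 < 2 := PySem.Int.mod_lt window (by norm_num)
  by_cases hle : w2 ≤ 0
  · -- empty strided range on both sides
    have hempty : PySem.List.pyRange (i - w2) (i + w2) 2 = ([] : List Int) := by
      rw [PySem.List.pyRange_of_pos _ _ (by norm_num : (0:Int) < 2)]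
      rw [if_neg (by omega)]
      simp
    rw [hempty]
    rw [if_pos (show (i + w2 ≤ i - w2) by omega)]
    simp
  · rw [if_neg (show ¬ (i + w2 ≤ i - w2) by omega)]
    have hwin2 : 2 ≤ window := by omega
    have hlo1 : 1 ≤ i - w2 := by omega
    have hhi : i + w2 + 1 ≤ (series.length : Int) := by omega
    set lo := i - w2 with hlodef
    set hi := i + w2 with hhidef
    have hlohi : lo < hi := by omega
    have hmod : PySem.Int.mod lo 2 = lo % 2 := PySem.Int.mod_eq_emod_of_pos (by norm_num)
    have hA : (PySem.List.pyRange lo hi 2).all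
          (fun j => decide (pvAt series j > pvAt series (j - 1) ∧ pvAt series j > pvAt series (j + 1))) = true
        ↔ ∀ k : Nat, lo.toNat ≤ k → k < hi.toNat → (k % 2 = lo.toNat % 2) → pvPeak series k = true := by
      rw [List.all_eq_true]
      constructor
      · intro hall k hk1 hk2 hk3
        have hjm : (k : Int) ∈ PySem.List.pyRange lo hi 2 := by
          rw [PySem.List.mem_pyRange_iff_of_pos (by norm_num)]
          refine ⟨by omega, by omega, by omega⟩
        have := hall _ hjm
        rw [pvAt_peak series k (by omega) (by omega)] at this
        simpa using this
      · intro hall j hjm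
        rw [PySem.List.mem_pyRange_iff_of_pos (by norm_num)] at hjm
        obtain ⟨hj1, hj2, hj3⟩ := hjm
        rw [pvAt_peak series j (by omega) (by omega)]
        exact hall j.toNat (by omega) (by omega) (by omega)
    have hhiN : hi.toNat < series.length + 1 := by omega
    have hloN : lo.toNat < series.length + 1 := by omega
    have hgE : ∀ p : Nat, ((List.range (series.length + 1)).map (pvBad series p)).getD hi.toNat 0
        = pvBad series p hi.toNat := fun p => PySem.List.getD_map_range _ _ _ _ hhiN
    have hgE' : ∀ p : Nat, ((List.range (series.length + 1)).map (pvBad series p)).getD lo.toNat 0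
        = pvBad series p lo.toNat := fun p => PySem.List.getD_map_range _ _ _ _ hloN
    have hB : ∀ p : Nat, p = lo.toNat % 2 →
        (pvBad series p hi.toNat = pvBad series p lo.toNat
          ↔ ∀ k : Nat, lo.toNat ≤ k → k < hi.toNat → (k % 2 = lo.toNat % 2) → pvPeak series k = true) := by
      intro p hp
      subst hp
      exact pvBad_eq_iff series _ (by omega)
    by_cases hpar : PySem.Int.mod lo 2 = 0
    · rw [if_pos hpar, hgE 0, hgE' 0]
      have hp0 : (0 : Nat) = lo.toNat % 2 := by rw [hmod] at hpar; omega
      exact if_congr (hA.trans ((hB 0 hp0)).symm) rfl rfl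
    · rw [if_neg hpar, hgE 1, hgE' 1]
      have hp1 : (1 : Nat) = lo.toNat % 2 := by rw [hmod] at hpar; omega
      exact if_congr (hA.trans ((hB 1 hp1)).symm) rfl rfl

-- ===== VERDICT (by name: the statement is the Claim_ definition above) =====
theorem detect_castle_top_pattern_spec : Claim_equal_detect_castle_top_pattern := by
  intro series window _
  unfold Spec_detect_castle_top_pattern detect_castle_top_pattern detect_castle_top_pattern_alt
  by_cases hlt : (series.length : Int) < window
  · rw [if_pos hlt, if_pos hlt]
  · rw [if_neg hlt, if_neg hlt]
    simp only []
    have hmap : (PySem.List.pyRange window ((series.length : Int) - window) 1).map (fun i =>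
        if (PySem.List.pyRange (i - PySem.Int.floordiv window 2) (i + PySem.Int.floordiv window 2) 2).all
             (fun j => decide (pvAt series j > pvAt series (j - 1) ∧ pvAt series j > pvAt series (j + 1)))
        then (1 : Int) else 0)
      = (PySem.List.pyRange window ((series.length : Int) - window) 1).map (fun i =>
        if i + PySem.Int.floordiv window 2 ≤ i - PySem.Int.floordiv window 2 then (1 : Int)
        else
          if (if PySem.Int.mod (i - PySem.Int.floordiv window 2) 2 = 0
                then (List.range (series.length + 1)).map (pvBad series 0)
                else (List.range (series.length + 1)).map (pvBad series 1)).getD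
               (i + PySem.Int.floordiv window 2).toNat 0
             = (if PySem.Int.mod (i - PySem.Int.floordiv window 2) 2 = 0
                then (List.range (series.length + 1)).map (pvBad series 0)
                else (List.range (series.length + 1)).map (pvBad series 1)).getD
               (i - PySem.Int.floordiv window 2).toNat 0
          then 1 else 0) := by
      apply List.map_congr_left
      intro i him
      rw [PySem.List.mem_pyRange_one] at him
      exact body_eq series window i (by omega) him.1 him.2
    rw [hmap]
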